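-- pv_equiv track=rewrite | github.com/Alperenlcr/Competitive-Programming | huprog_2022/huprog_sayisi2.py | solve
-- ===== SOURCE A (Python) =====
-- def two_six_count(D):
--
--     s = str(D)
--     return s.count("2") + s.count("6")
--
-- def solve(A,T):
--     origin = [two_six_count(x) for x in range(A,A+T)]
--
--     temp = [two_six_count(x) for x in range(A+1, A+1+T)]
--     count = A+1
--     while True:
--         if temp == origin:
--             return count
--         count += 1
--         temp.pop(0)
--         temp.append(two_six_count(count+T-1))
-- ===== SOURCE B (Python) =====
-- def two_six_count(D):
--     s = str(D)
--     return s.count("2") + s.count("6")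
--
-- def solve(A, T):
--     # Rabin-Karp sliding search: roll a polynomial hash of the current window in
--     # O(1) small-int work per step and recheck the real digit-count window only
--     # on a hash hit, instead of A's O(T) list comparison and pop(0) every step.
--     MOD = (1 << 61) - 1
--     BASE = 64
--     origin = [two_six_count(x) for x in range(A, A + T)]
--     ho = 0
--     for v in origin:
--         ho = (ho * BASE + v) % MOD
--     h = 0
--     for x in range(A + 1, A + 1 + T):
--         h = (h * BASE + two_six_count(x)) % MOD
--     top = pow(BASE, T - 1, MOD) if T > 0 else 0
--     count = A + 1
--     while True:
--         if h == ho and [two_six_count(x) for x in range(count, count + T)] == origin: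
--             return count
--         h = ((h - two_six_count(count) * top) * BASE + two_six_count(count + T)) % MOD
--         count += 1
-- ===== Notes on version B (the rewrite author's own statement) =====
-- stated objective: faster
-- what changed: B replaces A's per-step O(T) window comparison and pop(0) by a Rabin-Karp rolling polynomial hash mod 2^61-1, updated in O(1) small-int work per slide step, rebuilding and comparing the real digit-count window only on a hash hit.
import Mathlib
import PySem

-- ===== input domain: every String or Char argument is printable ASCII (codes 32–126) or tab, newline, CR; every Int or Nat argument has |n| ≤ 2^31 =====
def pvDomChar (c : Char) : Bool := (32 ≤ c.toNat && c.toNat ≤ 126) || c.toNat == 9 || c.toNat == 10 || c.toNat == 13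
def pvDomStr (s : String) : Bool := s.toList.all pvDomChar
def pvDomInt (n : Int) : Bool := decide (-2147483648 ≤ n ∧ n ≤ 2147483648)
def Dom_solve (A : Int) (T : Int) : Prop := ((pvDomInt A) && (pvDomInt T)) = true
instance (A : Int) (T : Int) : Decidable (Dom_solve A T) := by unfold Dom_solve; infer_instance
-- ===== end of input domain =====

-- B replaces A's per-step O(T) window comparison and pop(0) by a Rabin-Karp rolling
-- hash, rechecking the real window only on a hash hit (alternative algorithm, same results).

-- shared helper: str(D).count("2") + str(D).count("6")
def twoSixCount (D : Int) : Int :=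
  let s := PySem.Int.toStr D
  ((PySem.Str.count s "2" : Nat) : Int) + ((PySem.Str.count s "6" : Nat) : Int)

-- totality fuel, identical in both ports (a guard for the two while-True loops, whose
-- step counts coincide; for 0 ≤ A the first repeat is at most the next power of ten away)
def solveFuel (A : Int) (T : Int) : Nat := (A.natAbs + T.natAbs) * 1000 + 1000

-- ===== PORT A =====
def solveLoopA (origin : List Int) (temp : List Int) (count : Int) (T : Int) : Nat → Int
  | 0 => count
  | fuel + 1 =>
    if temp = origin then count
    else solveLoopA origin (temp.drop 1 ++ [twoSixCount (count + 1 + T - 1)]) (count + 1) T fuel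

def solve (A : Int) (T : Int) : Int :=
  let origin := (PySem.List.pyRange A (A + T) 1).map twoSixCount
  let temp := (PySem.List.pyRange (A + 1) (A + 1 + T) 1).map twoSixCount
  solveLoopA origin temp (A + 1) T (solveFuel A T)

-- ===== PORT B =====
-- MOD = (1 << 61) - 1 = 2305843009213693951, BASE = 64 (Source B's constants, inlined)
def solveLoopB (origin : List Int) (ho : Int) (h : Int) (top : Int) (count : Int) (T : Int) :
    Nat → Int
  | 0 => count
  | fuel + 1 =>
    -- 'h == ho and [...] == origin': the window is rebuilt and compared only on a hash hit
    if h = ho ∧ (PySem.List.pyRange count (count + T) 1).map twoSixCount = origin then count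
    else solveLoopB origin ho
      (PySem.Int.mod ((h - twoSixCount count * top) * 64 + twoSixCount (count + T))
        2305843009213693951)
      top (count + 1) T fuel

def solve_alt (A : Int) (T : Int) : Int :=
  let origin := (PySem.List.pyRange A (A + T) 1).map twoSixCount
  let ho := origin.foldl (fun o v => PySem.Int.mod (o * 64 + v) 2305843009213693951) 0
  let h := (PySem.List.pyRange (A + 1) (A + 1 + T) 1).foldl
    (fun o x => PySem.Int.mod (o * 64 + twoSixCount x) 2305843009213693951) 0
  -- pow(BASE, T-1, MOD): T > 0 is guaranteed at every use, so (T-1).toNat is exact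
  let top := if 0 < T then PySem.Int.powMod 64 (T - 1).toNat 2305843009213693951 else 0
  solveLoopB origin ho h top (A + 1) T (solveFuel A T)

-- ===== PRECONDITION & SPEC =====
def Spec_solve (A : Int) (T : Int) (out : Int) : Prop := out = solve_alt A T
instance (A : Int) (T : Int) (out : Int) : Decidable (Spec_solve A T out) := by unfold Spec_solve; infer_instance

-- ===== CLAIM (what is proved, stated in full; the proofs are below) =====
def Claim_equal_solve : Prop := ∀ (A : Int) (T : Int), Dom_solve A T → Spec_solve A T (solve A T)

-- ===== LEMMAS AND PROOFS =====

-- the exact base-64 value of a digit-count window; B's hash is this value mod 2^61-1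
def pvEncode (xs : List Int) : Int := xs.foldl (fun o c => o * 64 + c) 0

-- the window A maintains: the digit-count list of [c, c+T)
def pvWin (c : Int) (T : Int) : List Int := (PySem.List.pyRange c (c + T) 1).map twoSixCount

-- abbreviation for the modulus in the lemmas
def pvM : Int := 2305843009213693951

lemma pvM_pos : (0 : Int) < pvM := by norm_num [pvM]

lemma pvEncode_go (xs : List Int) : ∀ a : Int,
    xs.foldl (fun o c => o * 64 + c) a = a * 64 ^ xs.length + pvEncode xs := by
  induction xs with
  | nil => intro a; simp [pvEncode]
  | cons x xs ih =>
    intro a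
    have h1 : pvEncode (x :: xs) = (0 * 64 + x) * 64 ^ xs.length + pvEncode xs := by
      simp only [pvEncode, List.foldl_cons]
      exact ih (0 * 64 + x)
    simp only [List.foldl_cons, List.length_cons]
    rw [ih (a * 64 + x), h1]
    ring

lemma pvEncode_cons (x : Int) (xs : List Int) :
    pvEncode (x :: xs) = x * 64 ^ xs.length + pvEncode xs := by
  have h1 : pvEncode (x :: xs) = (0 * 64 + x) * 64 ^ xs.length + pvEncode xs := by
    simp only [pvEncode, List.foldl_cons]
    exact pvEncode_go xs (0 * 64 + x)
  rw [h1]; ring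

lemma pvEncode_append_singleton (xs : List Int) (v : Int) :
    pvEncode (xs ++ [v]) = pvEncode xs * 64 + v := by
  simp [pvEncode, List.foldl_append]

-- one fold step respects congruence mod pvM
lemma pvStep_congr (a b c : Int) (h : a % pvM = b % pvM) :
    (a * 64 + c) % pvM = (b * 64 + c) % pvM := by
  rw [Int.add_emod, Int.mul_emod, h, ← Int.mul_emod, ← Int.add_emod]

lemma pvFold_congr (xs : List Int) : ∀ a b : Int, a % pvM = b % pvM →
    (xs.foldl (fun o c => o * 64 + c) a) % pvM = (xs.foldl (fun o c => o * 64 + c) b) % pvM := by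
  induction xs with
  | nil => intro a b h; simpa using h
  | cons x xs ih =>
    intro a b h
    simp only [List.foldl_cons]
    exact ih _ _ (pvStep_congr a b x h)

-- the mod-reducing fold computes the plain fold mod pvM
lemma pvFoldMod (xs : List Int) : ∀ a : Int, 0 ≤ a → a < pvM →
    xs.foldl (fun o c => (o * 64 + c) % pvM) a = (xs.foldl (fun o c => o * 64 + c) a) % pvM := by
  induction xs with
  | nil => intro a h0 h1; simp [Int.emod_eq_of_lt h0 h1]
  | cons x xs ih =>
    intro a h0 h1
    simp only [List.foldl_cons]
    rw [ih _ (Int.emod_nonneg _ (by norm_num [pvM])) (Int.emod_lt_of_pos _ pvM_pos)]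
    exact pvFold_congr xs _ _ (Int.emod_emod_of_dvd _ dvd_rfl)

lemma pvWin_length (c T : Int) : (pvWin c T).length = T.toNat := by
  simp [pvWin, PySem.List.length_pyRange_one]

lemma pvWin_cons (c T : Int) (hT : 0 < T) :
    pvWin c T = twoSixCount c :: (PySem.List.pyRange (c + 1) (c + T) 1).map twoSixCount := by
  rw [pvWin, PySem.List.pyRange_one_cons (by omega)]
  simp

lemma pvWin_succ (c T : Int) (hT : 0 < T) :
    pvWin (c + 1) T = (PySem.List.pyRange (c + 1) (c + T) 1).map twoSixCount ++ [twoSixCount (c + T)] := by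
  rw [pvWin, show c + 1 + T = (c + T) + 1 by ring, PySem.List.pyRange_one_succ_right (by omega)]
  simp

-- the loops agree: B's hash is always the code of A's window mod pvM, so B's guarded
-- comparison fires exactly when A's full comparison does
lemma pvLoop_eq (origin : List Int) (top T : Int) (hlen : origin.length = T.toNat)
    (htop : 0 < T → top % pvM = (64 : Int) ^ (T - 1).toNat % pvM) :
    ∀ (fuel : Nat) (count : Int),
    solveLoopB origin (pvEncode origin % pvM) (pvEncode (pvWin count T) % pvM) top count T fuel
      = solveLoopA origin (pvWin count T) count T fuel := by
  intro fuel
  induction fuel with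
  | zero => intro count; rfl
  | succ fuel ih =>
    intro count
    rw [solveLoopA, solveLoopB]
    have hM : PySem.Int.mod ((pvEncode (pvWin count T) % pvM - twoSixCount count * top) * 64
        + twoSixCount (count + T)) 2305843009213693951
        = ((pvEncode (pvWin count T) % pvM - twoSixCount count * top) * 64
          + twoSixCount (count + T)) % pvM := by
      rw [PySem.Int.mod_eq_emod_of_pos (by norm_num)]
      rfl
    by_cases heq : pvWin count T = origin
    · rw [if_pos heq, if_pos ⟨by rw [heq], heq⟩]
    · rw [if_neg heq, if_neg (fun hc => heq hc.2)]
      have hTpos : 0 < T := by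
        by_contra hTn
        apply heq
        have h1 : (pvWin count T).length = 0 := by rw [pvWin_length]; omega
        have h2 : origin.length = 0 := by rw [hlen]; omega
        rw [List.length_eq_zero_iff] at h1 h2
        rw [h1, h2]
      -- A's new window is the window of count+1
      have hdrop : (pvWin count T).drop 1 ++ [twoSixCount (count + 1 + T - 1)] = pvWin (count + 1) T := by
        rw [pvWin_cons count T hTpos, pvWin_succ count T hTpos]
        simp only [List.drop_succ_cons, List.drop_zero]
        rw [show count + 1 + T - 1 = count + T by ring]
      -- B's new hash is the code of the window of count+1, mod pvM
      have hrlen : ((PySem.List.pyRange (count + 1) (count + T) 1).map twoSixCount).length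
          = (T - 1).toNat := by
        simp only [List.length_map, PySem.List.length_pyRange_one]
        congr 1
        ring
      have hexact : (pvEncode (pvWin count T) - twoSixCount count * 64 ^ (T - 1).toNat) * 64
          + twoSixCount (count + T) = pvEncode (pvWin (count + 1) T) := by
        rw [pvWin_cons count T hTpos, pvEncode_cons, hrlen,
          pvWin_succ count T hTpos, pvEncode_append_singleton]
        ring
      have hcong : ((pvEncode (pvWin count T) % pvM - twoSixCount count * top) * 64
          + twoSixCount (count + T)) % pvM = pvEncode (pvWin (count + 1) T) % pvM := by
        have h1 : Int.ModEq pvM (pvEncode (pvWin count T) % pvM) (pvEncode (pvWin count T)) :=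
          Int.emod_emod_of_dvd _ dvd_rfl
        have h2 : Int.ModEq pvM top ((64 : Int) ^ (T - 1).toNat) := htop hTpos
        have h3 : Int.ModEq pvM
            ((pvEncode (pvWin count T) % pvM - twoSixCount count * top) * 64
              + twoSixCount (count + T))
            ((pvEncode (pvWin count T) - twoSixCount count * 64 ^ (T - 1).toNat) * 64
              + twoSixCount (count + T)) :=
          (((h1.sub ((Int.ModEq.refl _).mul h2)).mul (Int.ModEq.refl 64)).add (Int.ModEq.refl _))
        rw [hexact] at h3
        exact h3
      rw [hM, hcong, hdrop]
      exact ih (count + 1)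

-- ===== VERDICT (by name: the statement is the Claim_ definition above) =====
theorem solve_spec : Claim_equal_solve := by
  intro A T _
  show solve A T = solve_alt A T
  simp only [solve, solve_alt]
  have hmod : ∀ o c : Int, PySem.Int.mod (o * 64 + c) 2305843009213693951 = (o * 64 + c) % pvM := by
    intro o c
    rw [PySem.Int.mod_eq_emod_of_pos (by norm_num)]
    rfl
  simp only [hmod]
  have haux : ∀ a b : Int,
      List.foldl (fun o x => (o * 64 + twoSixCount x) % pvM) 0 (PySem.List.pyRange a b 1)
        = pvEncode ((PySem.List.pyRange a b 1).map twoSixCount) % pvM := by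
    intro a b
    rw [← List.foldl_map (f := twoSixCount) (g := fun o c => (o * 64 + c) % pvM)]
    exact pvFoldMod _ 0 le_rfl pvM_pos
  rw [pvFoldMod ((PySem.List.pyRange A (A + T) 1).map twoSixCount) 0 le_rfl pvM_pos]
  rw [haux (A + 1) (A + 1 + T)]
  have h1 : (PySem.List.pyRange (A + 1) (A + 1 + T) 1).map twoSixCount = pvWin (A + 1) T := rfl
  have h2 : (PySem.List.pyRange A (A + T) 1).map twoSixCount = pvWin A T := rfl
  rw [h1, h2]
  have htop : 0 < T →
      (if 0 < T then PySem.Int.powMod 64 (T - 1).toNat 2305843009213693951 else 0) % pvM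
        = (64 : Int) ^ (T - 1).toNat % pvM := by
    intro hT
    rw [if_pos hT, PySem.Int.powMod_eq_emod 64 (T - 1).toNat (by norm_num)]
    exact Int.emod_emod_of_dvd _ dvd_rfl
  exact (pvLoop_eq (pvWin A T) _ T (pvWin_length A T) htop (solveFuel A T) (A + 1)).symm
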